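-- pv_equiv track=rewrite | github.com/gabriellaec/desoft-analise-exercicios | backup/user_288/ch66_2020_04_27_14_41_14_596048.py | lista_sufixos
-- ===== SOURCE A (Python) =====
-- def lista_sufixos(palavra):
--     i = 0
--     sufixos = []
--     while i < len(palavra)-1:
--         palavra2 = palavra[i:]
--         sufixos.append(palavra2)
--         i += 1
--     return sufixos
-- ===== SOURCE B (Python) =====
-- def lista_sufixos(palavra):
--     sufixos = []
--     while len(palavra) >= 2:
--         sufixos.append(palavra)
--         palavra = palavra[1:]
--     return sufixos
-- ===== Notes on version B (the rewrite author's own statement) =====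
-- stated objective: simpler
-- what changed: Replaces the index-counting while loop over a mutated accumulator with a direct structural recursion that peels the first character and prepends the current word.
import Mathlib
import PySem

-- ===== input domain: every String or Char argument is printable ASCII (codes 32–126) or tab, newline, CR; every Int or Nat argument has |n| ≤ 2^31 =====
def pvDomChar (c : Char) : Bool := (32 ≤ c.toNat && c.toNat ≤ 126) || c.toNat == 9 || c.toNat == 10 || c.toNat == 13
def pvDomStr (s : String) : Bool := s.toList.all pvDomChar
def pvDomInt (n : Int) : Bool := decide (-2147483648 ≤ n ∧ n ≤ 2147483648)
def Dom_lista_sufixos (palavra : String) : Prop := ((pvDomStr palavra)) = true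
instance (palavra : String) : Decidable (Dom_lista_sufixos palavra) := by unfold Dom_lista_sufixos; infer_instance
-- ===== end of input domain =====

-- B replaces A's index-counting while loop with a loop on the shrinking word peeling the first
-- character (simpler decomposition, same result; no speed claim).

-- ===== PORT A =====
-- while i < len(palavra)-1: sufixos.append(palavra[i:]); i += 1
def lista_sufixos (palavra : String) : List String :=
  (PySem.List.pyRange 0 (PySem.Str.len palavra - 1) 1).foldl
    (fun sufixos i => sufixos ++ [PySem.Str.slice palavra (some i) none]) []

-- ===== PORT B =====
-- while len(palavra) >= 2: sufixos.append(palavra); palavra = palavra[1:]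
-- the loop on the shrinking word, on its code-point list: [] and [_] are the len < 2 exit,
-- the recursive call is the next iteration on palavra[1:] with the grown accumulator
def lista_sufixos_altGo : List Char → List String → List String
  | c :: d :: rest, sufixos => lista_sufixos_altGo (d :: rest) (sufixos ++ [String.ofList (c :: d :: rest)])
  | _, sufixos => sufixos

def lista_sufixos_alt (palavra : String) : List String :=
  lista_sufixos_altGo palavra.toList []

-- ===== PRECONDITION & SPEC =====
def Spec_lista_sufixos (palavra : String) (out : List String) : Prop := out = lista_sufixos_alt palavra
instance (palavra : String) (out : List String) : Decidable (Spec_lista_sufixos palavra out) := by unfold Spec_lista_sufixos; infer_instance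

-- ===== CLAIM (what is proved, stated in full; the proofs are below) =====
def Claim_equal_lista_sufixos : Prop := ∀ (palavra : String), Dom_lista_sufixos palavra → Spec_lista_sufixos palavra (lista_sufixos palavra)

-- ===== LEMMAS AND PROOFS =====

-- B's loop appends the drops at indices 0 .. length-2, longest first
theorem lista_sufixos_altGo_eq (l : List Char) (suf : List String) :
    lista_sufixos_altGo l suf = suf ++ (List.range (l.length - 1)).map (fun i => String.ofList (l.drop i)) := by
  induction l generalizing suf with
  | nil => simp [lista_sufixos_altGo]
  | cons c t ih =>
    cases t with
    | nil => simp [lista_sufixos_altGo]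
    | cons d rest =>
      have hlen : (c :: d :: rest).length - 1 = (d :: rest).length := by simp
      rw [lista_sufixos_altGo, ih, hlen, show (d :: rest).length = rest.length + 1 from rfl,
        List.range_succ_eq_map, List.map_cons, List.map_map, List.append_assoc, List.singleton_append]
      simp [Function.comp]

-- A computes the same list: its fold is a map over range(len-1)
theorem lista_sufixos_eq (palavra : String) :
    lista_sufixos palavra = (List.range (palavra.toList.length - 1)).map (fun i => String.ofList (palavra.toList.drop i)) := by
  unfold lista_sufixos
  rw [PySem.List.foldl_append_singleton_eq_map, List.nil_append]
  have hlen : PySem.Str.len palavra = (palavra.toList.length : Int) := by simp [pysem]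
  rw [hlen]
  cases hn : palavra.toList.length with
  | zero => simp [PySem.List.pyRange]
  | succ m =>
    have : ((m + 1 : Nat) : Int) - 1 = ((m : Nat) : Int) := by push_cast; ring
    rw [this, PySem.List.pyRange_zero_natCast, List.map_map]
    simp only [Nat.add_sub_cancel]
    apply List.map_congr_left
    intro i _
    simp [Function.comp, PySem.Str.slice, pysem]

-- ===== VERDICT (by name: the statement is the Claim_ definition above) =====
theorem lista_sufixos_spec : Claim_equal_lista_sufixos := by
  intro palavra _
  unfold Spec_lista_sufixos lista_sufixos_alt
  rw [lista_sufixos_eq, lista_sufixos_altGo_eq, List.nil_append]
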